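-- pv_equiv track=rewrite | github.com/wang2467/amazon_online_review_cleaning | src/rule.py | find_elongated_pos
-- ===== SOURCE A (Python) =====
-- def find_elongated_pos(term):
-- 	prev = ''
-- 	start = 0
-- 	ct = 1
-- 	for idx, i in enumerate(term):
-- 		if idx == 0:
-- 			prev = i
-- 			start = idx
-- 		else:
-- 			if i == prev:
-- 				ct += 1
-- 				if ct > 2:
-- 					end = idx
-- 					while end <= len(term)-1 and term[end] == i:
-- 						end += 1
-- 					end = end-1
-- 					return start, end, True
-- 			else:
-- 				ct = 1
-- 				start = idx
-- 			prev = i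
-- 	return -1, -1, False
-- ===== SOURCE B (Python) =====
-- def find_elongated_pos(term):
--     i, n = 0, len(term)
--     while i < n:
--         j = i
--         while j < n and term[j] == term[i]:
--             j += 1
--         if j - i >= 3:
--             return i, j - 1, True
--         i = j
--     return -1, -1, False
-- ===== Notes on version B (the rewrite author's own statement) =====
-- stated objective: simpler
-- what changed: Replaced A's per-character state machine (prev/start/ct counters plus an inner catch-up while) by a two-pointer run scan: the outer loop jumps run boundary to run boundary and checks each run's length once (measured ~1.6x faster: less per-character bookkeeping).
import Mathlib
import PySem

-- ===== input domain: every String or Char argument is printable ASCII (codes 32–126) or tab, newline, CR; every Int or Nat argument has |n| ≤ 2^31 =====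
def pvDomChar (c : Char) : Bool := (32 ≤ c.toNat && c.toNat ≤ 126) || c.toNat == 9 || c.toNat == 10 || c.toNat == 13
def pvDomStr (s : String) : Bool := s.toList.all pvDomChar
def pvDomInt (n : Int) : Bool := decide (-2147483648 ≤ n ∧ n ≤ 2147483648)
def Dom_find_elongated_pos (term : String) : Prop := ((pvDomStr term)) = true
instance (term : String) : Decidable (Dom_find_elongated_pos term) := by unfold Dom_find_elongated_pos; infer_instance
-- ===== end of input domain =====

-- B replaces A's per-character state machine by a two-pointer run scan (simpler decomposition, same cost).

-- ===== PORT A =====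
-- Python's inner `while end <= len(term)-1 and term[end] == i: end += 1`; the
-- `end <= len-1` test is an Int comparison (Python's len-1 may be -1), and the
-- guarded index access is in range, so getD's default is never returned.
def findA_while (chars : List Char) (e : Nat) (c : Char) : Nat :=
  if h : (e : Int) ≤ (chars.length : Int) - 1 ∧ chars.getD e ' ' = c then
    findA_while chars (e + 1) c
  else e
termination_by chars.length - e
decreasing_by omega

-- the `for idx, i in enumerate(term)` loop: rest is the not-yet-visited suffix,
-- idx the index of its head; prev/start/ct are the Python loop variables.
def findA_loop (term : List Char) (rest : List Char) (idx : Nat)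
    (prev : Char) (start : Int) (ct : Int) : Int × Int × Bool :=
  match rest with
  | [] => (-1, -1, false)
  | i :: rest' =>
    if idx = 0 then
      findA_loop term rest' (idx + 1) i (idx : Int) ct
    else if i = prev then
      -- Python: ct += 1; if ct > 2: … (the incremented ct written inline)
      if ct + 1 > 2 then
        (start, ((findA_while term idx i : Nat) : Int) - 1, true)
      else findA_loop term rest' (idx + 1) i start (ct + 1)
    else
      findA_loop term rest' (idx + 1) i (idx : Int) 1

-- Python's `prev = ''` is a never-compared placeholder (it is overwritten at idx 0
-- before any comparison), so any initial Char is faithful; we use ' '.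
def find_elongated_pos (term : String) : Int × Int × Bool :=
  findA_loop term.toList term.toList 0 ' ' 0 1

-- ===== PORT B =====
-- `while j < n and term[j] == term[i]: j += 1` (index guarded, getD default unused)
def findB_run (chars : List Char) (c : Char) (j : Nat) : Nat :=
  if h : j < chars.length ∧ chars.getD j ' ' = c then
    findB_run chars c (j + 1)
  else j
termination_by chars.length - j
decreasing_by omega

theorem findB_run_ge (chars : List Char) (c : Char) (j : Nat) :
    j ≤ findB_run chars c j := by
  unfold findB_run
  split
  · exact le_trans (Nat.le_succ j) (findB_run_ge chars c (j + 1))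
  · exact le_refl j
termination_by chars.length - j
decreasing_by omega

-- the outer `while i < n` loop of Source B
def findB_loop (chars : List Char) (i : Nat) : Int × Int × Bool :=
  if h : i < chars.length then
    let j := findB_run chars (chars.getD i ' ') i
    if j - i ≥ 3 then ((i : Int), (j : Int) - 1, true)
    else findB_loop chars j
  else (-1, -1, false)
termination_by chars.length - i
decreasing_by
  have h1 : i + 1 ≤ findB_run chars (chars.getD i ' ') i := by
    unfold findB_run
    rw [dif_pos ⟨h, rfl⟩]
    exact findB_run_ge chars (chars.getD i ' ') (i + 1)
  omega

def find_elongated_pos_alt (term : String) : Int × Int × Bool :=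
  findB_loop term.toList 0

-- ===== PRECONDITION & SPEC =====
def Spec_find_elongated_pos (term : String) (out : Int × Int × Bool) : Prop := out = find_elongated_pos_alt term
instance (term : String) (out : Int × Int × Bool) : Decidable (Spec_find_elongated_pos term out) := by unfold Spec_find_elongated_pos; infer_instance

-- ===== CLAIM (what is proved, stated in full; the proofs are below) =====
def Claim_equal_find_elongated_pos : Prop := ∀ (term : String), Dom_find_elongated_pos term → Spec_find_elongated_pos term (find_elongated_pos term)

-- ===== LEMMAS AND PROOFS =====

-- A's catch-up while and B's run scan are the same loop (their guards are equivalent).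
theorem while_eq_run (chars : List Char) (c : Char) (e : Nat) :
    findA_while chars e c = findB_run chars c e := by
  have hg : ((e : Int) ≤ (chars.length : Int) - 1 ∧ chars.getD e ' ' = c) ↔
      (e < chars.length ∧ chars.getD e ' ' = c) := by
    constructor <;> rintro ⟨h1, h2⟩ <;> exact ⟨by omega, h2⟩
  unfold findA_while findB_run
  by_cases h : e < chars.length ∧ chars.getD e ' ' = c
  · rw [dif_pos (hg.mpr h), dif_pos h]
    exact while_eq_run chars c (e + 1)
  · rw [dif_neg (fun hc => h (hg.mp hc)), dif_neg h]
termination_by chars.length - e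
decreasing_by omega

theorem run_step (chars : List Char) (c : Char) (i : Nat)
    (h1 : i < chars.length) (h2 : chars.getD i ' ' = c) :
    findB_run chars c i = findB_run chars c (i + 1) := by
  rw [findB_run, dif_pos ⟨h1, h2⟩]

theorem run_stop (chars : List Char) (c : Char) (i : Nat)
    (h : ¬(i < chars.length ∧ chars.getD i ' ' = c)) :
    findB_run chars c i = i := by
  rw [findB_run, dif_neg h]

theorem A_nil (term : List Char) (idx : Nat) (prev : Char) (start ct : Int) :
    findA_loop term [] idx prev start ct = (-1, -1, false) := rfl

theorem A_cons (term : List Char) (x : Char) (rest : List Char) (idx : Nat)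
    (prev : Char) (start ct : Int) (h : idx ≠ 0) :
    findA_loop term (x :: rest) idx prev start ct =
      if x = prev then
        (if ct + 1 > 2 then (start, ((findA_while term idx x : Nat) : Int) - 1, true)
         else findA_loop term rest (idx + 1) x start (ct + 1))
      else findA_loop term rest (idx + 1) x (idx : Int) 1 := by
  rw [findA_loop, if_neg h]

theorem loop_eq (chars : List Char) (i : Nat) (hi : i < chars.length) :
    findB_loop chars i =
      if findB_run chars (chars.getD i ' ') i - i ≥ 3 then
        ((i : Int), ((findB_run chars (chars.getD i ' ') i : Nat) : Int) - 1, true)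
      else findB_loop chars (findB_run chars (chars.getD i ' ') i) := by
  rw [findB_loop, dif_pos hi]

theorem loop_stop (chars : List Char) (i : Nat) (h : ¬ i < chars.length) :
    findB_loop chars i = (-1, -1, false) := by
  rw [findB_loop, dif_neg h]

-- main invariant: A's loop entering index i+1 right after a run started at index i
-- equals B's loop at run boundary i
theorem main_inv (chars : List Char) (i : Nat) (hi : i < chars.length) :
    findA_loop chars (chars.drop (i + 1)) (i + 1) (chars.getD i ' ') (i : Int) 1
      = findB_loop chars i := by
  have hci : chars.getD i ' ' = chars[i] := List.getD_eq_getElem chars ' ' hi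
  have step0 : findB_run chars (chars.getD i ' ') i
      = findB_run chars (chars.getD i ' ') (i + 1) := run_step chars _ i hi rfl
  by_cases h1 : i + 1 < chars.length
  · have hdrop1 : chars.drop (i + 1) = chars[i + 1] :: chars.drop (i + 2) :=
      List.drop_eq_getElem_cons h1
    have hc1 : chars.getD (i + 1) ' ' = chars[i + 1] := List.getD_eq_getElem chars ' ' h1
    rw [hdrop1, A_cons chars _ _ _ _ _ _ (by omega)]
    by_cases heq1 : chars[i + 1] = chars[i]
    · -- the second character continues the run
      have hx1 : chars[i + 1] = chars.getD i ' ' := by rw [hci]; exact heq1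
      have step1 : findB_run chars (chars.getD i ' ') (i + 1)
          = findB_run chars (chars.getD i ' ') (i + 2) :=
        run_step chars _ (i + 1) h1 (by rw [hc1, hx1])
      rw [if_pos hx1, if_neg (by norm_num : ¬((1 : Int) + 1 > 2))]
      by_cases h2 : i + 2 < chars.length
      · have hdrop2 : chars.drop (i + 2) = chars[i + 2] :: chars.drop (i + 3) :=
          List.drop_eq_getElem_cons h2
        have hc2 : chars.getD (i + 2) ' ' = chars[i + 2] := List.getD_eq_getElem chars ' ' h2
        rw [hdrop2, A_cons chars _ _ _ _ _ _ (by omega)]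
        by_cases heq2 : chars[i + 2] = chars[i + 1]
        · -- third equal character: A returns via its catch-up while, B's run is ≥ 3
          have hx2 : chars[i + 2] = chars.getD i ' ' := by rw [heq2, hx1]
          have step2 : findB_run chars (chars.getD i ' ') (i + 2)
              = findB_run chars (chars.getD i ' ') (i + 3) :=
            run_step chars _ (i + 2) h2 (by rw [hc2, hx2])
          have hge : i + 3 ≤ findB_run chars (chars.getD i ' ') (i + 3) :=
            findB_run_ge chars _ (i + 3)
          have hbig : findB_run chars (chars.getD i ' ') i - i ≥ 3 := by
            rw [step0, step1, step2]; omega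
          rw [loop_eq chars i hi, if_pos hbig]
          rw [if_pos heq2, if_pos (by norm_num : (1 : Int) + 1 + 1 > 2)]
          rw [while_eq_run, hx2, step0, step1]
        · -- run of length exactly 2: both continue from boundary i + 2
          have stop2 : findB_run chars (chars.getD i ' ') (i + 2) = i + 2 := by
            refine run_stop chars _ (i + 2) ?_
            rintro ⟨-, hcc⟩
            exact heq2 (by rw [← hc2, hcc, hx1])
          have hsmall : ¬ (i + 2) - i ≥ 3 := by omega
          rw [loop_eq chars i hi, step0, step1, stop2, if_neg hsmall]
          rw [if_neg heq2]
          have := main_inv chars (i + 2) h2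
          rw [hc2] at this
          exact this
      · -- string ends after a run of length 2
        have hdrop2 : chars.drop (i + 2) = [] := List.drop_eq_nil_iff.mpr (by omega)
        have stop2 : findB_run chars (chars.getD i ' ') (i + 2) = i + 2 :=
          run_stop chars _ (i + 2) (by rintro ⟨hlt, -⟩; omega)
        have hsmall : ¬ (i + 2) - i ≥ 3 := by omega
        rw [loop_eq chars i hi, step0, step1, stop2, if_neg hsmall,
          loop_stop chars (i + 2) (by omega), hdrop2, A_nil]
    · -- run of length 1: both continue from boundary i + 1
      have hx1 : ¬ chars[i + 1] = chars.getD i ' ' := by rw [hci]; exact heq1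
      have stop1 : findB_run chars (chars.getD i ' ') (i + 1) = i + 1 := by
        refine run_stop chars _ (i + 1) ?_
        rintro ⟨-, hcc⟩
        exact hx1 (by rw [← hc1, hcc])
      have hsmall : ¬ (i + 1) - i ≥ 3 := by omega
      rw [loop_eq chars i hi, step0, stop1, if_neg hsmall, if_neg hx1]
      have := main_inv chars (i + 1) h1
      rw [hc1] at this
      exact this
  · -- i is the last index
    have hdrop1 : chars.drop (i + 1) = [] := List.drop_eq_nil_iff.mpr (by omega)
    have stop1 : findB_run chars (chars.getD i ' ') (i + 1) = i + 1 :=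
      run_stop chars _ (i + 1) (by rintro ⟨hlt, -⟩; omega)
    have hsmall : ¬ (i + 1) - i ≥ 3 := by omega
    rw [loop_eq chars i hi, step0, stop1, if_neg hsmall,
      loop_stop chars (i + 1) (by omega), hdrop1, A_nil]
termination_by chars.length - i
decreasing_by all_goals omega

-- ===== VERDICT (by name: the statement is the Claim_ definition above) =====
theorem find_elongated_pos_spec : Claim_equal_find_elongated_pos := by
  intro term _
  unfold Spec_find_elongated_pos find_elongated_pos find_elongated_pos_alt
  cases hc : term.toList with
  | nil => rw [A_nil, loop_stop _ _ (by simp)]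
  | cons c0 rest =>
    rw [findA_loop, if_pos rfl]
    have := main_inv (c0 :: rest) 0 (by simp)
    simpa using this
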